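-- pv_equiv track=rewrite | github.com/kimtaehyuk1/come_on-codingtest | 프로그래머스/원형수열.py | solution
-- ===== SOURCE A (Python) =====
-- def solution(elements):
--
--     answer = 0
--     # 연속된거니까 배열 받은걸 두배해서 붙이자
--     dou_elements = elements * 2
--     # 길이가 1부터 길이가 len(elements)까지 할껀데 길이 1하고, len(elements)는 정해저 있으니까 for를 그 사이만 돌고 더해주자
--
--
--     cnt_lsit = []  #더할거 담아줄 그릇
--
--     # 사이값 돌려주기
--     for i in range(1,len(elements)+1): # 길이 for문
--         for j in range(len(elements)): #여긴 실제 돌릴for문 인덱스로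
--             tmp = sum(dou_elements[j:j+i])
--             cnt_lsit.append(tmp)
--
--     #여기서 일관적으로 set처리
--     cnt_set = set(cnt_lsit)
--
--     answer = len(cnt_set)
--
--     return answer
-- ===== SOURCE B (Python) =====
-- def solution(elements):
--     n = len(elements)
--     dou = elements * 2
--     # prefix sums of the doubled array: pre[k] = sum of first k elements
--     pre = [0]
--     s = 0
--     for x in dou:
--         s += x
--         pre.append(s)
--     seen = set()
--     for i in range(1, n + 1):
--         for j in range(n):
--             seen.add(pre[j + i] - pre[j])
--     return len(seen)
-- ===== Notes on version B (the rewrite author's own statement) =====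
-- stated objective: faster
-- what changed: B precomputes prefix sums of the doubled array so each window sum is one subtraction instead of an O(n) sum(slice), and inserts into the set directly instead of building a list first.
import Mathlib
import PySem

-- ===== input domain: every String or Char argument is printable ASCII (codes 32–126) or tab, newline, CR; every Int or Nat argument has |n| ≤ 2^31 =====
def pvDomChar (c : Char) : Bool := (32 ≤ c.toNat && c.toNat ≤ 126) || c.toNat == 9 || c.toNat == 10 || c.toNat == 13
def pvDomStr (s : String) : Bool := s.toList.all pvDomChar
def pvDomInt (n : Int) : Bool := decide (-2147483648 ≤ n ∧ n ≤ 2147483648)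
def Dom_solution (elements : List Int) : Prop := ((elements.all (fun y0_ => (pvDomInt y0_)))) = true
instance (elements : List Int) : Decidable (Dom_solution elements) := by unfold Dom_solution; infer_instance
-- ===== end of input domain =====

-- B replaces A's per-window sum(slice) (O(n^3) total) by prefix sums of the doubled
-- array, one subtraction per window (O(n^2)), inserting into the set directly.

-- ===== PORT A =====
def solution (elements : List Int) : Int :=
  let dou := PySem.List.pyRepeat elements 2
  let n : Int := elements.length
  let cnt := (PySem.List.pyRange 1 (n + 1)).foldl
    (fun acc i => (PySem.List.pyRange 0 n).foldl
      (fun acc2 j => acc2 ++ [(PySem.List.slice dou (some j) (some (j + i))).sum]) acc) []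
  ((PySem.Set.ofList cnt).length : Int)

-- ===== PORT B =====
def solution_alt (elements : List Int) : Int :=
  let n : Int := elements.length
  let dou := PySem.List.pyRepeat elements 2
  let pre := (dou.foldl (fun (p : List Int × Int) x => (p.1 ++ [p.2 + x], p.2 + x))
    (([0] : List Int), (0 : Int))).1
  let seen := (PySem.List.pyRange 1 (n + 1)).foldl
    (fun s i => (PySem.List.pyRange 0 n).foldl
      (fun s j => PySem.Set.add s (PySem.List.pyGetD pre (j + i) 0 - PySem.List.pyGetD pre j 0)) s)
    PySem.Set.empty
  (seen.length : Int)

-- ===== PRECONDITION & SPEC =====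
def Spec_solution (elements : List Int) (out : Int) : Prop := out = solution_alt elements
instance (elements : List Int) (out : Int) : Decidable (Spec_solution elements out) := by unfold Spec_solution; infer_instance

-- ===== CLAIM (what is proved, stated in full; the proofs are below) =====
def Claim_equal_solution : Prop := ∀ (elements : List Int), Dom_solution elements → Spec_solution elements (solution elements)

-- ===== LEMMAS AND PROOFS =====

-- B's prefix-sum loop produces exactly the list of partial sums.
theorem preFold_spec (l : List Int) (p : List Int) (s : Int) :
    (l.foldl (fun (q : List Int × Int) x => (q.1 ++ [q.2 + x], q.2 + x)) (p ++ [s], s)).1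
      = p ++ (List.range (l.length + 1)).map (fun k => s + (l.take k).sum) := by
  induction l generalizing p s with
  | nil => simp
  | cons x t ih =>
    simp only [List.foldl_cons]
    rw [show p ++ [s] ++ [s + x] = (p ++ [s]) ++ [s + x] from by simp, ih]
    conv_rhs => rw [List.range_succ_eq_map]
    simp [List.map_map, Function.comp, List.take_succ_cons, add_assoc]

theorem preFold_spec0 (l : List Int) :
    (l.foldl (fun (q : List Int × Int) x => (q.1 ++ [q.2 + x], q.2 + x)) (([0] : List Int), 0)).1
      = (List.range (l.length + 1)).map (fun k => ((l.take k).sum : Int)) := by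
  have := preFold_spec l [] 0
  simpa using this

-- One window: prefix difference equals the slice sum.
theorem window_eq (dou : List Int) (i j : Int) (hj : 0 ≤ j) (hi : 0 ≤ i)
    (hle : j.toNat + i.toNat ≤ dou.length) :
    PySem.List.pyGetD ((List.range (dou.length + 1)).map (fun k => ((dou.take k).sum : Int))) (j + i) 0
      - PySem.List.pyGetD ((List.range (dou.length + 1)).map (fun k => ((dou.take k).sum : Int))) j 0
      = (PySem.List.slice dou (some j) (some (j + i))).sum := by
  have hji : (0 : Int) ≤ j + i := by omega
  have hts : (j + i).toNat = j.toNat + i.toNat := by omega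
  rw [PySem.List.pyGetD_of_nonneg _ _ hji, PySem.List.pyGetD_of_nonneg _ _ hj,
    PySem.List.getD_map_range _ _ _ _ (by omega), PySem.List.getD_map_range _ _ _ _ (by omega),
    PySem.List.slice_toNat dou hj hji, hts]
  rw [show (j.toNat + i.toNat) - j.toNat = i.toNat from by omega, List.take_add, List.sum_append]
  ring

-- A nested add-fold over f i j is the ofList-fold over the flattened value list.
theorem foldl_add_nested {α β γ : Type} [BEq γ] (l : List α) (m : List β) (f : α → β → γ)
    (s : PySem.Set γ) :
    l.foldl (fun s i => m.foldl (fun s j => PySem.Set.add s (f i j)) s) s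
      = (l.flatMap (fun i => m.map (f i))).foldl PySem.Set.add s := by
  induction l generalizing s with
  | nil => simp
  | cons x t ih =>
    simp only [List.foldl_cons, List.flatMap_cons, List.foldl_append, ih]
    rw [List.foldl_map]

theorem pyRepeat_two_length (elements : List Int) :
    (PySem.List.pyRepeat elements 2).length = 2 * elements.length := by
  simp [PySem.List.pyRepeat]
  omega

-- ===== VERDICT (by name: the statement is the Claim_ definition above) =====
theorem solution_spec : Claim_equal_solution := by
  intro elements _
  unfold Spec_solution solution solution_alt
  simp only []
  set n : Int := (elements.length : Int) with hn
  set dou := PySem.List.pyRepeat elements 2 with hdou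
  -- A side: collect the appended list
  simp only [PySem.List.foldl_append_singleton_eq_map, PySem.List.foldl_append_eq_flatMap,
    List.nil_append]
  -- B side: flatten the nested add-fold and name the prefix list
  rw [preFold_spec0, foldl_add_nested]
  rw [show (PySem.Set.empty : PySem.Set Int) = ([] : List Int) from rfl,
    ← PySem.Set.ofList_eq_foldl]
  congr 2
  refine congrArg _ (List.flatMap_congr ?_)
  intro i hi
  obtain ⟨hi1, hi2⟩ := PySem.List.mem_pyRange_one.mp hi
  apply List.map_congr_left
  intro j hj
  obtain ⟨hj0, hjn⟩ := PySem.List.mem_pyRange_one.mp hj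
  have hlen : (dou.length : Int) = 2 * n := by
    rw [hdou, pyRepeat_two_length]; push_cast [hn]; ring
  exact (window_eq dou i j hj0 (by omega) (by omega)).symm
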